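-- pv_equiv track=rewrite | github.com/Hagdos/Adventofcode | 2021/Day 19/Day 19.py | rotateScanner
-- ===== SOURCE A (Python) =====
-- def rotateBeacon(beacon):
--     for face in range(3):
--         for dx in (-1, 1):
--             x = beacon[face] * dx
--             y = beacon[face-2] * dx
--             z = beacon[face-1]
--
--             for _ in range(4):
--                 yield tuple((x,y,z))
--                 y, z = -z, y
--
-- def rotateScanner(scanner):
--     generators = []
--     for b in scanner:
--         generators.append(rotateBeacon(b))
--
--     for _ in range(24):
--         newscanner = set()
--         for i in range(len(scanner)):
--             newscanner.add(next(generators[i]))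
--         yield newscanner
-- ===== SOURCE B (Python) =====
-- # Rotation-major: precompute the 24 (face, dx, roll) transforms once, then emit
-- # each rotated set by applying one closed-form transform to every beacon.
-- def rotateScanner(scanner):
--     transforms = []
--     for face in range(3):
--         for dx in (-1, 1):
--             for r in range(4):
--                 transforms.append((face, dx, r))
--     for face, dx, r in transforms:
--         newscanner = set()
--         for b in scanner:
--             x = b[face] * dx
--             y = b[(face - 2) % 3] * dx
--             z = b[(face - 1) % 3]
--             if r == 1:
--                 y, z = -z, y
--             elif r == 2:
--                 y, z = -y, -z
--             elif r == 3:
--                 y, z = z, -y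
--             newscanner.add((x, y, z))
--         yield newscanner
-- ===== Notes on version B (the rewrite author's own statement) =====
-- stated objective: simpler
-- what changed: A interleaves one stateful 24-yield generator per beacon (incremental roll state) and advances them all in lockstep to assemble each set beacon-major; B precomputes the 24 (face,dx,roll) transforms once and emits each set rotation-major by applying one closed-form transform to every beacon.
import Mathlib
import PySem

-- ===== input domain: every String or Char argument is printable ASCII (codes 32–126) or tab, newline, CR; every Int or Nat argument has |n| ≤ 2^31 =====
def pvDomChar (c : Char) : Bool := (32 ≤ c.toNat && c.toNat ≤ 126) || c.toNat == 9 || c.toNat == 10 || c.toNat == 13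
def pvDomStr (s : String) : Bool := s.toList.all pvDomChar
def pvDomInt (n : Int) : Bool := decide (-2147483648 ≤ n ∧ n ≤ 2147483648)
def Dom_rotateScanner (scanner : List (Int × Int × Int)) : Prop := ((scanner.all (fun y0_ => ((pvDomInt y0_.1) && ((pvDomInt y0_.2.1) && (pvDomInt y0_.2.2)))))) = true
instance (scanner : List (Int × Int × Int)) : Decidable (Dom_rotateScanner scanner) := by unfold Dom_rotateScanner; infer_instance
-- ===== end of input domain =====

-- B replaces A's beacon-major interleaved generators (incremental roll state, advanced in lockstep)
-- by a rotation-major pass over a precomputed table of the 24 (face, dx, roll) transforms; objective: simpler.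
-- Python A/B return generators of sets; ported as the list of the 24 yielded sets (PySem.Set, insertion order).

-- ===== PORT A =====
-- beacon[i] on a 3-tuple for the indices A uses (0,1,2 and negative wraparound -2,-1); exact there
def pvIdx3 (b : Int × Int × Int) (i : Int) : Int :=
  if i = 0 then b.1 else if i = 1 ∨ i = -2 then b.2.1 else b.2.2

-- the inner 'for _ in range(4): yield (x,y,z); y,z = -z,y' of rotateBeacon
def pvRoll : Int → Int → Int → Nat → List (Int × Int × Int)
  | _, _, _, 0 => []
  | x, y, z, n+1 => (x, y, z) :: pvRoll x (-z) y n

-- rotateBeacon(b): the generator's full yield stream (24 tuples) in order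
def rotateBeaconA (b : Int × Int × Int) : List (Int × Int × Int) :=
  ([0, 1, 2] : List Int).foldl (fun acc face =>
    ([-1, 1] : List Int).foldl (fun acc2 dx =>
      acc2 ++ pvRoll (pvIdx3 b face * dx) (pvIdx3 b (face - 2) * dx) (pvIdx3 b (face - 1)) 4) acc) []

-- one pass of 'for i in range(len(scanner)): newscanner.add(next(generators[i]))'
def pvNextAll (gens : List (List (Int × Int × Int))) : PySem.Set (Int × Int × Int) :=
  gens.foldl (fun s g => PySem.Set.add s (g.headD (0, 0, 0))) PySem.Set.empty

-- 'for _ in range(24): yield newscanner' with each generator advanced by one (headD default never reached)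
def pvLoopA : Nat → List (List (Int × Int × Int)) → List (PySem.Set (Int × Int × Int))
  | 0, _ => []
  | n + 1, gens => pvNextAll gens :: pvLoopA n (gens.map (List.drop 1))

def rotateScanner (scanner : List (Int × Int × Int)) : List (List (Int × Int × Int)) :=
  pvLoopA 24 (scanner.map rotateBeaconA)

-- ===== PORT B =====
-- the precomputed table of the 24 (face, dx, roll) transforms
def pvTransforms : List (Int × Int × Nat) :=
  ([0, 1, 2] : List Int).flatMap (fun face =>
    ([-1, 1] : List Int).flatMap (fun dx =>
      ([0, 1, 2, 3] : List Nat).map (fun r => (face, dx, r))))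

-- b[i] for i in {0,1,2} (B indexes with (face-2)%3, (face-1)%3, always in range)
def pvGet3 (b : Int × Int × Int) (i : Int) : Int :=
  if i = 0 then b.1 else if i = 1 then b.2.1 else b.2.2

-- one transform applied to one beacon, roll by closed form
def pvApply (face dx : Int) (r : Nat) (b : Int × Int × Int) : Int × Int × Int :=
  let x := pvGet3 b face * dx
  let y := pvGet3 b (PySem.Int.mod (face - 2) 3) * dx
  let z := pvGet3 b (PySem.Int.mod (face - 1) 3)
  if r = 1 then (x, -z, y)
  else if r = 2 then (x, -y, -z)
  else if r = 3 then (x, z, -y)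
  else (x, y, z)

def rotateScanner_alt (scanner : List (Int × Int × Int)) : List (List (Int × Int × Int)) :=
  pvTransforms.map (fun t =>
    scanner.foldl (fun s b => PySem.Set.add s (pvApply t.1 t.2.1 t.2.2 b)) PySem.Set.empty)

-- ===== PRECONDITION & SPEC =====
def Spec_rotateScanner (scanner : List (Int × Int × Int)) (out : List (List (Int × Int × Int))) : Prop := out = rotateScanner_alt scanner
instance (scanner : List (Int × Int × Int)) (out : List (List (Int × Int × Int))) : Decidable (Spec_rotateScanner scanner out) := by unfold Spec_rotateScanner; infer_instance

-- ===== CLAIM (what is proved, stated in full; the proofs are below) =====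
def Claim_equal_rotateScanner : Prop := ∀ (scanner : List (Int × Int × Int)), Dom_rotateScanner scanner → Spec_rotateScanner scanner (rotateScanner scanner)

-- ===== LEMMAS AND PROOFS =====

-- A's yield stream for one beacon is exactly B's transform table applied to that beacon
theorem rotateBeaconA_eq (b : Int × Int × Int) :
    rotateBeaconA b = pvTransforms.map (fun t => pvApply t.1 t.2.1 t.2.2 b) := by
  obtain ⟨p, q, w⟩ := b
  simp [rotateBeaconA, pvRoll, pvIdx3, pvTransforms, pvApply, pvGet3, PySem.Int.mod]

-- A's lockstep-generator loop, run as many times as there are transforms, is B's rotation-major map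
theorem pvLoopA_eq (ts : List (Int × Int × Nat)) :
    ∀ (g : (Int × Int × Int) → List (Int × Int × Int)) (xs : List (Int × Int × Int)),
      (∀ b, g b = ts.map (fun t => pvApply t.1 t.2.1 t.2.2 b)) →
      pvLoopA ts.length (xs.map g) =
        ts.map (fun t => xs.foldl (fun s b => PySem.Set.add s (pvApply t.1 t.2.1 t.2.2 b)) PySem.Set.empty) := by
  induction ts with
  | nil => intro g xs _; simp [pvLoopA]
  | cons t ts ih =>
    intro g xs hg
    simp only [List.length_cons, pvLoopA, List.map_map, List.map_cons]
    congr 1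
    · simp only [pvNextAll, List.foldl_map]
      have hfun : (fun (s : PySem.Set (Int × Int × Int)) b => PySem.Set.add s ((g b).headD (0, 0, 0)))
          = fun s b => PySem.Set.add s (pvApply t.1 t.2.1 t.2.2 b) := by
        funext s b; rw [hg b]; rfl
      rw [hfun]
    · have := ih (fun b => List.drop 1 (g b)) xs (by intro b; show List.drop 1 (g b) = _; rw [hg b]; rfl)
      simpa only [Function.comp_def] using this

-- ===== VERDICT (by name: the statement is the Claim_ definition above) =====
theorem rotateScanner_spec : Claim_equal_rotateScanner := by
  intro scanner _
  show rotateScanner scanner = rotateScanner_alt scanner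
  have h24 : (24 : Nat) = pvTransforms.length := by decide
  rw [rotateScanner, rotateScanner_alt, h24]
  exact pvLoopA_eq pvTransforms rotateBeaconA scanner rotateBeaconA_eq
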